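-- pv_equiv track=rewrite | github.com/alxwen711/contestSubmissionArchive | codeforces/live contests/2023-3/887/a copy.py | f
-- ===== SOURCE A (Python) =====
-- def f(n,k,ar,x):
--     higher = n
--     for i in range(k):
--         while x < ar[higher-1]:
--             higher -= 1
--             if higher == 0: break
--         x -= higher
--         if higher == 0: break
--     return x
-- ===== SOURCE B (Python) =====
-- def f(n, k, ar, x):
--     # Single flat loop: each step either lowers h by one, or batches the whole
--     # run of rounds that stay at the current h via a closed-form count t.
--     rem, h = k, n
--     while rem > 0 and h > 0:
--         a = ar[h - 1]
--         if x < a: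
--             h -= 1
--         else:
--             t = min(rem, (x - a) // h + 1)
--             x -= t * h
--             rem -= t
--     return x
-- ===== Notes on version B (the rewrite author's own statement) =====
-- stated objective: alternative
-- what changed: A simulates every one of the k rounds with a nested descent loop; B is one flat loop whose every step either lowers h by one or consumes in O(1) the whole run of rounds t = min(rem,(x-a)//h+1) that stay at the current h, so it takes at most n + (number of phases) <= 2n+1 steps instead of k rounds.
-- outside the precondition, e.g. on f(0, 1, [5], 10): A returns 10, B returns 10; on f(-1, 2, [3, 5], 10): A returns 12, B returns 10
import Mathlib
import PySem

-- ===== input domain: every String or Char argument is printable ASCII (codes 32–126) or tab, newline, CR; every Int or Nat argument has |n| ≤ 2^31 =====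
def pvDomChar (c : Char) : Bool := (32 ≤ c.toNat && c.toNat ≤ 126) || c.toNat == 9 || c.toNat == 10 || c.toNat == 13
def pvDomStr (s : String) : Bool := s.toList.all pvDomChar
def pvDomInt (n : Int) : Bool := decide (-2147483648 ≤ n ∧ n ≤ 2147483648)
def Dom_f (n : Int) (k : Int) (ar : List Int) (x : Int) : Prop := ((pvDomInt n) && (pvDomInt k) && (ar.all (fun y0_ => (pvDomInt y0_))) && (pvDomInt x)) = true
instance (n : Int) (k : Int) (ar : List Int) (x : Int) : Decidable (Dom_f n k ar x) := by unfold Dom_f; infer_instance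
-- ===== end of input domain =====

-- B replaces A's k-round simulation (nested descent loop inside a for-loop) by one flat loop
-- that either lowers h or batches a whole constant-h run of rounds in closed form; equal on Pre_f.

-- ===== PORT A =====
-- inner 'while x < ar[higher-1]' loop; fuel bounds the descent (none from pyGet? = IndexError, excluded by Pre_f)
def fInner (x : Int) (ar : List Int) : Nat → Int → Int
  | 0, h => h
  | fuel+1, h =>
    match PySem.List.pyGet? ar (h - 1) with
    | none => h
    | some v =>
      if x < v then
        if h - 1 = 0 then 0 else fInner x ar fuel (h - 1)
      else h

-- 'for i in range(k)' body
def fOuter (ar : List Int) : Nat → Int → Int → Int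
  | 0, _, x => x
  | i+1, h, x =>
    let h' := fInner x ar (h.toNat + ar.length + 1) h
    let x' := x - h'
    if h' = 0 then x' else fOuter ar i h' x'

def f (n : Int) (k : Int) (ar : List Int) (x : Int) : Int := fOuter ar k.toNat n x

-- ===== PORT B =====
-- the single 'while rem > 0 and h > 0' loop of Source B; each step lowers h or lowers rem by t ≥ 1,
-- so fuel k.toNat + n.toNat is exact on Pre_f
def fStep (ar : List Int) : Nat → Int → Int → Int → Int
  | 0, _, _, x => x
  | fuel+1, rem, h, x =>
    if 0 < rem ∧ 0 < h then
      match PySem.List.pyGet? ar (h - 1) with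
      | none => x
      | some a =>
        if x < a then fStep ar fuel rem (h - 1) x
        else
          let t := min rem (PySem.Int.floordiv (x - a) h + 1)
          fStep ar fuel (rem - t) h (x - t * h)
    else x

def f_alt (n : Int) (k : Int) (ar : List Int) (x : Int) : Int :=
  fStep ar (k.toNat + n.toNat) k n x

-- ===== PRECONDITION & SPEC =====
-- Pre_f excludes k > 0 with n outside 1..len(ar): there A either raises IndexError (ar[n-1]
-- out of range) or reaches elements through Python negative-index wraparound, an artefact of
-- A's implementation that B does not reproduce.
def Pre_f (n : Int) (k : Int) (ar : List Int) (x : Int) : Prop :=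
  0 < k → (1 ≤ n ∧ n ≤ ar.length)
instance (n : Int) (k : Int) (ar : List Int) (x : Int) : Decidable (Pre_f n k ar x) := by
  unfold Pre_f; infer_instance

def pvWitness_f : Int × Int × List Int × Int := (2, 3, [1, 4], 10)

def Spec_f (n : Int) (k : Int) (ar : List Int) (x : Int) (out : Int) : Prop := out = f_alt n k ar x
instance (n : Int) (k : Int) (ar : List Int) (x : Int) (out : Int) : Decidable (Spec_f n k ar x out) := by unfold Spec_f; infer_instance

-- ===== CLAIM (what is proved, stated in full; the proofs are below) =====
def Claim_equal_f : Prop := ∀ (n : Int) (k : Int) (ar : List Int) (x : Int), Dom_f n k ar x → Pre_f n k ar x → Spec_f n k ar x (f n k ar x)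

-- ===== LEMMAS AND PROOFS =====

-- characterisation of A's inner descent
def desc (x : Int) (ar : List Int) : Nat → Int
  | 0 => 0
  | m+1 => if x < (ar[m]?.getD 0) then desc x ar m else ((m : Int) + 1)

theorem desc_fix (x : Int) (ar : List Int) (j : Nat) (h : ¬ x < (ar[j]?.getD 0)) :
    desc x ar (j+1) = (j : Int) + 1 := by
  simp [desc, h]

theorem pyGet?_getD (ar : List Int) (j : Nat) (hj : j < ar.length) :
    PySem.List.pyGet? ar (j : Int) = some ((ar[j]?.getD 0)) := by
  simp [PySem.List.pyGet?_natCast, List.getElem?_eq_getElem hj, List.getD, List.getD_eq_getElem?_getD]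

theorem fInner_eq_desc (x : Int) (ar : List Int) :
    ∀ (m fuel : Nat), 1 ≤ m → m ≤ ar.length → m ≤ fuel →
      fInner x ar fuel (m : Int) = desc x ar m := by
  intro m
  induction m with
  | zero => omega
  | succ m ih =>
    intro fuel _ hlen hfuel
    cases fuel with
    | zero => omega
    | succ fl =>
      have hcast : ((m : Int) + 1) - 1 = (m : Int) := by ring
      simp only [fInner, Nat.cast_succ, hcast, pyGet?_getD ar m (by omega)]
      by_cases hx : x < (ar[m]?.getD 0)
      · simp only [hx, if_pos]
        by_cases hm : m = 0
        · subst hm; simp [desc, hx]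
        · have hne : (m : Int) ≠ 0 := by exact_mod_cast hm
          simp only [hne, if_neg, if_true]
          rw [ih fl (by omega) (by omega) (by omega)]
          simp [desc, hx]
      · simp [desc, hx]

-- t consecutive A-rounds at constant higher = j+1
theorem fOuter_const (ar : List Int) (j : Nat) (hj : j < ar.length) :
    ∀ (t m : Nat) (x : Int), t ≤ m →
      (∀ i : Nat, i < t → (ar[j]?.getD 0) ≤ x - (i : Int) * ((j : Int) + 1)) →
      fOuter ar m ((j : Int) + 1) x = fOuter ar (m - t) ((j : Int) + 1) (x - (t : Int) * ((j : Int) + 1)) := by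
  intro t
  induction t with
  | zero => intro m x _ _; simp
  | succ t ih =>
    intro m x htm hx
    cases m with
    | zero => omega
    | succ m' =>
      have ha : ¬ x < (ar[j]?.getD 0) := by
        have := hx 0 (by omega); simpa using not_lt.mpr (by simpa using this)
      have hin : fInner x ar (((j : Int) + 1).toNat + ar.length + 1) ((j : Int) + 1)
          = (j : Int) + 1 := by
        rw [show ((j : Int) + 1) = ((j + 1 : Nat) : Int) by push_cast; ring]
        rw [fInner_eq_desc x ar (j+1) _ (by omega) (by omega) (by omega)]
        rw [desc_fix x ar j ha]; push_cast; ring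
      have hne : ((j : Int) + 1) ≠ 0 := by positivity
      simp only [fOuter, hin, hne, if_neg, if_false]
      rw [ih m' (x - ((j : Int) + 1)) (by omega)]
      · congr 1
        · omega
        · push_cast; ring
      · intro i hi
        have := hx (i + 1) (by omega)
        have : (ar[j]?.getD 0) ≤ x - ((i : Int) + 1) * ((j : Int) + 1) := by push_cast at this ⊢; linarith
        linarith [this]

-- when x < ar[h-1], one A-round from h equals one A-round from h-1 (the descent commutes out)
theorem fOuter_drop (ar : List Int) (m : Nat) (h x : Int)
    (h2 : 2 ≤ h) (hlen : h ≤ ar.length)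
    (hx : x < (ar[h.toNat - 1]?.getD 0)) :
    fOuter ar (m+1) h x = fOuter ar (m+1) (h - 1) x := by
  have hIn1 : fInner x ar (h.toNat + ar.length + 1) h = desc x ar h.toNat := by
    rw [show h = ((h.toNat : Nat) : Int) by omega]
    exact fInner_eq_desc x ar h.toNat _ (by omega) (by omega) (by omega)
  have hIn2 : fInner x ar ((h - 1).toNat + ar.length + 1) (h - 1) = desc x ar (h.toNat - 1) := by
    rw [show h - 1 = ((h.toNat - 1 : Nat) : Int) by omega]
    exact fInner_eq_desc x ar (h.toNat - 1) _ (by omega) (by omega) (by omega)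
  have hdesc : desc x ar h.toNat = desc x ar (h.toNat - 1) := by
    have : h.toNat = (h.toNat - 1) + 1 := by omega
    rw [this, desc]
    simp [hx]
  simp only [fOuter, hIn1, hIn2, hdesc]

-- merged-loop ↔ round-loop equivalence
theorem main_eq (ar : List Int) :
    ∀ (fuel : Nat) (m : Nat) (h x : Int), 0 ≤ h → h ≤ ar.length →
      (m = 0 ∨ 1 ≤ h) → m + h.toNat ≤ fuel →
      fStep ar fuel ((m : Nat) : Int) h x = fOuter ar m h x := by
  intro fuel
  induction fuel with
  | zero =>
    intro m h x _ _ _ hfuel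
    have hm : m = 0 := by omega
    subst hm; simp [fStep, fOuter]
  | succ fl ih =>
    intro m h x hh0 hhlen hpos hfuel
    cases m with
    | zero =>
      simp [fStep, fOuter]
    | succ s =>
      have hh1 : 1 ≤ h := by rcases hpos with h | h; omega; exact h
      have hcond : 0 < ((s + 1 : Nat) : Int) ∧ 0 < h := ⟨by positivity, by omega⟩
      have hjl : h.toNat - 1 < ar.length := by omega
      have hget : PySem.List.pyGet? ar (h - 1) = some ((ar[h.toNat - 1]?.getD 0)) := by
        rw [show h - 1 = ((h.toNat - 1 : Nat) : Int) by omega]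
        exact pyGet?_getD ar (h.toNat - 1) hjl
      simp only [fStep, hcond, and_self, if_pos, hget]
      set a := (ar[h.toNat - 1]?.getD 0) with ha_def
      by_cases hx : x < a
      · -- B lowers h; A's round is unchanged by the descent step
        simp only [hx, if_pos]
        by_cases hone : h = 1
        · -- h - 1 = 0: B's loop exits; A's round finds higher' = 0 and breaks with x - 0
          subst hone
          rw [show (1 : Int) - 1 = 0 by norm_num]
          have hB : fStep ar fl ((s + 1 : Nat) : Int) 0 x = x := by
            cases fl <;> simp [fStep]
          rw [hB]
          have hIn : fInner x ar (1 + ar.length + 1) 1 = desc x ar 1 := by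
            rw [show (1 : Int) = ((1 : Nat) : Int) by norm_num]
            exact fInner_eq_desc x ar 1 _ le_rfl (by omega) (by omega)
          have hx0 : x < (ar[0]?.getD 0) := by
            rw [ha_def, show ((1 : Int).toNat - 1) = 0 by norm_num] at hx
            exact hx
          have hd1 : desc x ar 1 = 0 := by simp [desc, hx0]
          simp [fOuter, hIn, hd1]
        · rw [ih (s+1) (h-1) x (by omega) (by omega) (by omega) (by omega)]
          exact (fOuter_drop ar s h x (by omega) hhlen hx).symm
      · -- B batches t rounds at constant h
        simp only [hx, if_neg, if_false]
        set j := h.toNat - 1 with hj_def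
        have hhj : h = (j : Int) + 1 := by omega
        have hpos' : (0 : Int) < (j : Int) + 1 := by positivity
        have hfd : PySem.Int.floordiv (x - a) h = (x - a) / ((j : Int) + 1) := by
          rw [hhj]; exact PySem.Int.floordiv_eq_ediv_of_pos hpos'
        set q := (x - a) / ((j : Int) + 1) with hq_def
        have hxa' : a ≤ x := le_of_not_gt hx
        have hq0 : 0 ≤ q := Int.ediv_nonneg (by omega) (by omega)
        have hqmul : q * ((j : Int) + 1) ≤ x - a := Int.ediv_mul_le (x - a) (by omega)
        have hqmul2 : x - a < (q + 1) * ((j : Int) + 1) := by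
          have := Int.lt_ediv_add_one_mul_self (x - a) hpos'
          simpa [hq_def] using this
        set t := min ((s + 1 : Nat) : Int) (PySem.Int.floordiv (x - a) h + 1) with ht_def
        have ht_eq : t = min ((s + 1 : Nat) : Int) (q + 1) := by rw [ht_def, hfd]
        have ht1 : 1 ≤ t := by rw [ht_eq]; push_cast; omega
        have hts : t ≤ ((s + 1 : Nat) : Int) := by rw [ht_eq]; exact min_le_left _ _
        have hbound : ∀ i : Nat, i < t.toNat → a ≤ x - (i : Int) * ((j : Int) + 1) := by
          intro i hi
          have hit : (i : Int) ≤ q := by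
            have h2 : t ≤ q + 1 := by rw [ht_eq]; exact min_le_right _ _
            omega
          have : (i : Int) * ((j : Int) + 1) ≤ q * ((j : Int) + 1) :=
            mul_le_mul_of_nonneg_right hit (by omega)
          nlinarith
        have hconst := fOuter_const ar j hjl t.toNat (s+1) x (by omega) hbound
        have hrem : ((s + 1 : Nat) : Int) - t = (((s + 1 - t.toNat : Nat) : Nat) : Int) := by
          push_cast; omega
        rw [hrem, ih (s + 1 - t.toNat) h (x - t * h) hh0 hhlen (by omega) (by omega)]
        have htn : ((t.toNat : Nat) : Int) = t := by omega
        rw [htn, ← hhj] at hconst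
        rw [hconst]

-- ===== VERDICT (by name: the statement is the Claim_ definition above) =====
theorem f_spec : Claim_equal_f := by
  intro n k ar x _ hpre
  unfold Spec_f f f_alt
  by_cases hk : 0 < k
  · obtain ⟨hn1, hnlen⟩ := hpre hk
    have hkc : ((k.toNat : Nat) : Int) = k := by omega
    rw [← hkc]
    exact (main_eq ar (k.toNat + n.toNat) k.toNat n x (by omega) (by exact_mod_cast hnlen)
      (Or.inr hn1) (by omega)).symm
  · have h0 : k.toNat = 0 := by omega
    rw [h0]
    have : fStep ar (0 + n.toNat) k n x = x := by
      cases n.toNat <;> simp [fStep, show ¬ (0 < k) from hk]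
    rw [this]; simp [fOuter]
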